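-- pv_equiv track=rewrite | github.com/Houston4444/RaySession | src/shared/ray.py | is_valid_full_path
-- ===== SOURCE A (Python) =====
-- def is_valid_full_path(path: str) -> bool:
--     if not path.startswith('/'):
--         return False
--
--     for forbidden in ('//', '/./', '/../'):
--         if forbidden in path:
--             return False
--
--     if path.endswith(('/.', '/..')):
--         return False
--     return True
-- ===== SOURCE B (Python) =====
-- def is_valid_full_path(path: str) -> bool:
--     # single pass: scan characters, tracking the current segment since the last '/'
--     if not path or path[0] != '/':
--         return False
--     seg = ''
--     for ch in path[1:]:
--         if ch == '/':
--             if seg in ('', '.', '..'):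
--                 return False
--             seg = ''
--         else:
--             seg = seg + ch
--     return seg not in ('.', '..')
-- ===== Notes on version B (the rewrite author's own statement) =====
-- stated objective: alternative
-- what changed: Replaced A's three fixed substring scans plus the tuple-endswith check with a single left-to-right character scan that tracks the current path segment and rejects an empty, current-directory or parent-directory segment at each interior slash or at the end of the string.
import Mathlib
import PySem

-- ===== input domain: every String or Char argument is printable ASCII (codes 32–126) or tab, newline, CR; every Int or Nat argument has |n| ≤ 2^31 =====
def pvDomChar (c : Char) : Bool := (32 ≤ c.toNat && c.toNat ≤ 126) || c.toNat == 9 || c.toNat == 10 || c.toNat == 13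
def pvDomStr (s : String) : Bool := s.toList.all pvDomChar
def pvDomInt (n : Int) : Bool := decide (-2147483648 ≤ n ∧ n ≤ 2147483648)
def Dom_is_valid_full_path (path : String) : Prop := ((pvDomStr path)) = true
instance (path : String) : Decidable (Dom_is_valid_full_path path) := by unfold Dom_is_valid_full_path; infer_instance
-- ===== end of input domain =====

-- B replaces A's fixed substring scans with a single character scan tracking the current segment (alternative decomposition, same cost).


-- ===== PORT A =====
def is_valid_full_path (path : String) : Bool :=
  if !(PySem.Str.startswith path "/") then false
  else if ["//", "/./", "/../"].any (fun forbidden => PySem.Str.isIn forbidden path) then false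
  else if PySem.Str.endswith path "/." || PySem.Str.endswith path "/.." then false
  else true

-- ===== PORT B =====
-- Source B's loop over path[1:]; seg = the characters accumulated since the last '/'
def pvSegLoop : List Char → List Char → Bool
  | seg, [] => !(seg == ['.'] || seg == ['.', '.'])
  | seg, c :: rest =>
      if c = '/' then
        if seg == [] || seg == ['.'] || seg == ['.', '.'] then false else pvSegLoop [] rest
      else pvSegLoop (seg ++ [c]) rest

def is_valid_full_path_alt (path : String) : Bool :=
  match path.toList with
  | [] => false
  | c :: rest => if c ≠ '/' then false else pvSegLoop [] rest

-- ===== PRECONDITION & SPEC =====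
def Spec_is_valid_full_path (path : String) (out : Bool) : Prop := out = is_valid_full_path_alt path
instance (path : String) (out : Bool) : Decidable (Spec_is_valid_full_path path out) := by unfold Spec_is_valid_full_path; infer_instance

-- ===== CLAIM (what is proved, stated in full; the proofs are below) =====
def Claim_equal_is_valid_full_path : Prop := ∀ (path : String), Dom_is_valid_full_path path → Spec_is_valid_full_path path (is_valid_full_path path)

-- ===== LEMMAS AND PROOFS =====

-- A's rejection conditions, on the character list
def ValidChars (t : List Char) : Prop :=
  ¬ ['/', '/'] <:+: t ∧ ¬ ['/', '.', '/'] <:+: t ∧ ¬ ['/', '.', '.', '/'] <:+: t ∧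
    ¬ ['/', '.'] <:+ t ∧ ¬ ['/', '.', '.'] <:+ t

-- a slash-headed pattern ignores a slash-free prefix block
theorem slashHead_infix_append {p' seg t : List Char} (h : '/' ∉ seg) :
    ('/' :: p') <:+: (seg ++ t) ↔ ('/' :: p') <:+: t := by
  induction seg with
  | nil => simp
  | cons s0 seg' ih =>
      have h' : '/' ∉ seg' := fun hm => h (List.mem_cons_of_mem _ hm)
      have h0 : s0 ≠ '/' := fun he => h (he ▸ List.mem_cons_self)
      simp only [List.cons_append, List.infix_cons_iff]
      constructor
      · rintro (hp | hp)
        · rcases List.cons_prefix_cons.mp hp with ⟨he, -⟩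
          exact absurd he.symm h0
        · exact (ih h').mp hp
      · intro hp
        exact Or.inr ((ih h').mpr hp)

theorem slashHead_suffix_append {p' seg t : List Char} (h : '/' ∉ seg) :
    ('/' :: p') <:+ (seg ++ t) ↔ ('/' :: p') <:+ t := by
  induction seg with
  | nil => simp
  | cons s0 seg' ih =>
      have h' : '/' ∉ seg' := fun hm => h (List.mem_cons_of_mem _ hm)
      simp only [List.cons_append, List.suffix_cons_iff]
      constructor
      · rintro (hp | hp)
        · have : s0 = '/' := by injection hp with h1 _; exact h1.symm
          exact absurd (this ▸ List.mem_cons_self) h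
        · exact (ih h').mp hp
      · intro hp
        exact Or.inr ((ih h').mpr hp)

theorem slashHead_suffix_of_no_slash {p' seg : List Char} (h : '/' ∉ seg) :
    ¬ ('/' :: p') <:+ seg := fun hs => h (hs.sublist.mem List.mem_cons_self)

theorem slashHead_infix_of_no_slash {p' seg : List Char} (h : '/' ∉ seg) :
    ¬ ('/' :: p') <:+: seg := fun hs => h (hs.sublist.mem List.mem_cons_self)

-- base case: the tail after the final '/' is slash-free
theorem valid_slash_seg {seg : List Char} (h : '/' ∉ seg) :
    ValidChars ('/' :: seg) ↔ (seg ≠ ['.'] ∧ seg ≠ ['.', '.']) := by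
  have hinfix : ∀ p' : List Char, '/' ∈ p' → ¬ ('/' :: p') <:+: ('/' :: seg) := by
    intro p' hp' hinf
    rcases List.infix_cons_iff.mp hinf with hpre | hinf'
    · rcases List.cons_prefix_cons.mp hpre with ⟨-, hp⟩
      exact h (hp.sublist.mem hp')
    · exact slashHead_infix_of_no_slash h hinf'
  have hsuffix : ∀ p' : List Char, ('/' :: p') <:+ ('/' :: seg) ↔ p' = seg := by
    intro p'
    rw [List.suffix_cons_iff]
    constructor
    · rintro (heq | hs)
      · injection heq
      · exact absurd hs (slashHead_suffix_of_no_slash h)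
    · rintro rfl; exact Or.inl rfl
  unfold ValidChars
  rw [hsuffix, hsuffix]
  constructor
  · rintro ⟨-, -, -, h1, h2⟩
    exact ⟨fun he => h1 he.symm, fun he => h2 he.symm⟩
  · rintro ⟨h1, h2⟩
    exact ⟨hinfix ['/'] (by simp), hinfix ['.', '/'] (by simp), hinfix ['.', '.', '/'] (by simp),
      fun he => h1 he.symm, fun he => h2 he.symm⟩

-- step case: a finished acceptable segment can be dropped
theorem valid_drop_seg {seg l' : List Char} (h : '/' ∉ seg)
    (h0 : seg ≠ []) (h1 : seg ≠ ['.']) (h2 : seg ≠ ['.', '.']) :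
    ValidChars ('/' :: (seg ++ '/' :: l')) ↔ ValidChars ('/' :: l') := by
  have hsuf : ∀ p' : List Char, '/' ∉ p' →
      (('/' :: p') <:+ ('/' :: (seg ++ '/' :: l')) ↔ ('/' :: p') <:+ ('/' :: l')) := by
    intro p' hp'
    rw [List.suffix_cons_iff, slashHead_suffix_append h]
    constructor
    · rintro (heq | hs)
      · exfalso
        have : p' = seg ++ '/' :: l' := by injection heq
        exact hp' (this ▸ (List.mem_append.mpr (Or.inr List.mem_cons_self)))
      · exact hs
    · intro hs; exact Or.inr hs
  have hpre : ∀ p' : List Char,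
      (p' = ['/'] ∨ p' = ['.', '/'] ∨ p' = ['.', '.', '/']) →
      ¬ p' <+: (seg ++ '/' :: l') := by
    rintro p' hp hpre
    rcases hp with rfl | rfl | rfl
    · rcases seg with - | ⟨s0, s'⟩
      · exact h0 rfl
      · rcases List.cons_prefix_cons.mp hpre with ⟨he, -⟩
        exact h (he ▸ List.mem_cons_self)
    · rcases seg with - | ⟨s0, s'⟩
      · exact h0 rfl
      · rcases List.cons_prefix_cons.mp hpre with ⟨he, hrest⟩
        rcases s' with - | ⟨s1, s''⟩
        · exact h1 (by rw [← he])
        · rcases List.cons_prefix_cons.mp hrest with ⟨he2, -⟩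
          exact h (he2 ▸ List.mem_cons_of_mem _ List.mem_cons_self)
    · rcases seg with - | ⟨s0, s'⟩
      · exact h0 rfl
      · rcases List.cons_prefix_cons.mp hpre with ⟨he, hrest⟩
        rcases s' with - | ⟨s1, s''⟩
        · rcases List.cons_prefix_cons.mp hrest with ⟨he2, -⟩
          exact absurd he2 (by decide)
        · rcases List.cons_prefix_cons.mp hrest with ⟨he2, hrest2⟩
          rcases s'' with - | ⟨s2, s'''⟩
          · exact h2 (by rw [← he, ← he2])
          · rcases List.cons_prefix_cons.mp hrest2 with ⟨he3, -⟩
            exact h (he3 ▸ List.mem_cons_of_mem _ (List.mem_cons_of_mem _ List.mem_cons_self))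
  have hinf : ∀ p' : List Char,
      (p' = ['/'] ∨ p' = ['.', '/'] ∨ p' = ['.', '.', '/']) →
      (('/' :: p') <:+: ('/' :: (seg ++ '/' :: l')) ↔ ('/' :: p') <:+: ('/' :: l')) := by
    intro p' hp
    rw [List.infix_cons_iff, slashHead_infix_append h]
    constructor
    · rintro (hpr | hi)
      · rcases List.cons_prefix_cons.mp hpr with ⟨-, hpr'⟩
        exact absurd hpr' (hpre p' hp)
      · exact hi
    · intro hi; exact Or.inr hi
  unfold ValidChars
  rw [hinf ['/'] (Or.inl rfl), hinf ['.', '/'] (Or.inr (Or.inl rfl)),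
    hinf ['.', '.', '/'] (Or.inr (Or.inr rfl)),
    hsuf ['.'] (by decide), hsuf ['.', '.'] (by decide)]

theorem segLoop_iff : ∀ (l seg : List Char), '/' ∉ seg →
    (pvSegLoop seg l = true ↔ ValidChars ('/' :: (seg ++ l))) := by
  intro l
  induction l with
  | nil =>
      intro seg h
      rw [List.append_nil, valid_slash_seg h]
      simp [pvSegLoop]
  | cons c l' ih =>
      intro seg h
      by_cases hc : c = '/'
      · subst hc
        by_cases hseg : seg = [] ∨ seg = ['.'] ∨ seg = ['.', '.']
        · have hfalse : pvSegLoop seg ('/' :: l') = false := by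
            rcases hseg with rfl | rfl | rfl <;> simp [pvSegLoop]
          rw [hfalse]
          constructor
          · intro hx; exact absurd hx (by simp)
          · intro hv
            exfalso
            rcases hseg with rfl | rfl | rfl
            · exact hv.1 ⟨[], l', rfl⟩
            · exact hv.2.1 ⟨[], l', rfl⟩
            · exact hv.2.2.1 ⟨[], l', rfl⟩
        · push Not at hseg
          obtain ⟨h0, h1, h2⟩ := hseg
          have hstep : pvSegLoop seg ('/' :: l') = pvSegLoop [] l' := by
            have e0 : (seg == ([] : List Char)) = false := by simpa using h0
            have e1 : (seg == ['.']) = false := by simpa using h1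
            have e2 : (seg == ['.', '.']) = false := by simpa using h2
            simp [pvSegLoop, e0, e1, e2]
          rw [hstep, ih [] (by simp), valid_drop_seg h h0 h1 h2]
          simp
      · have hstep : pvSegLoop seg (c :: l') = pvSegLoop (seg ++ [c]) l' := by
          simp [pvSegLoop, hc]
        have h' : '/' ∉ seg ++ [c] := by
          simp only [List.mem_append, List.mem_singleton]
          rintro (hm | he)
          · exact h hm
          · exact hc he.symm
        rw [hstep, ih (seg ++ [c]) h']
        simp

theorem A_iff (path : String) :
    is_valid_full_path path = true ↔ ['/'] <+: path.toList ∧ ValidChars path.toList := by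
  have e1 : "/".toList = ['/'] := rfl
  have e2 : "//".toList = ['/', '/'] := rfl
  have e3 : "/./".toList = ['/', '.', '/'] := rfl
  have e4 : "/../".toList = ['/', '.', '.', '/'] := rfl
  have e5 : "/.".toList = ['/', '.'] := rfl
  have e6 : "/..".toList = ['/', '.', '.'] := rfl
  unfold is_valid_full_path ValidChars
  simp only [PySem.Str.startswith_eq, PySem.Str.isIn_eq, PySem.Str.endswith_eq,
    e1, e2, e3, e4, e5, e6, List.any_cons, List.any_nil]
  split_ifs with hs hf he
  · simp only [false_iff]
    rintro ⟨hpre, -⟩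
    rw [Bool.not_eq_true'] at hs
    rw [(PySem.Chars.startswith_iff _ _).mpr hpre] at hs
    exact Bool.false_ne_true hs.symm
  · simp only [false_iff]
    rintro ⟨-, h1, h2, h3, -⟩
    simp only [Bool.or_eq_true] at hf
    rcases hf with hf | hf | hf
    · exact h1 ((PySem.Chars.isIn_iff_infix _ _).mp hf)
    · exact h2 ((PySem.Chars.isIn_iff_infix _ _).mp hf)
    · exact h3 ((PySem.Chars.isIn_iff_infix _ _).mp (by simpa using hf))
  · simp only [false_iff]
    rintro ⟨-, -, -, -, h4, h5⟩
    rcases Bool.or_eq_true_iff.mp he with he | he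
    · exact h4 ((PySem.Chars.endswith_iff _ _).mp he)
    · exact h5 ((PySem.Chars.endswith_iff _ _).mp he)
  · simp only [true_iff]
    have hs' : PySem.Chars.startswith path.toList ['/'] = true := by simpa using hs
    simp only [Bool.or_eq_true, not_or, Bool.not_eq_true] at hf he
    obtain ⟨hf1, hf2, hf3⟩ := hf
    obtain ⟨he1, he2⟩ := he
    refine ⟨(PySem.Chars.startswith_iff _ _).mp hs', ?_, ?_, ?_, ?_, ?_⟩
    · intro hx
      have hy := (PySem.Chars.isIn_iff_infix _ _).mpr hx
      rw [hf1] at hy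
      exact Bool.false_ne_true hy
    · intro hx
      have hy := (PySem.Chars.isIn_iff_infix _ _).mpr hx
      rw [hf2] at hy
      exact Bool.false_ne_true hy
    · intro hx
      have hy := (PySem.Chars.isIn_iff_infix _ _).mpr hx
      rw [hf3.1] at hy
      exact Bool.false_ne_true hy
    · intro hx
      have hy := (PySem.Chars.endswith_iff _ _).mpr hx
      rw [he1] at hy
      exact Bool.false_ne_true hy
    · intro hx
      have hy := (PySem.Chars.endswith_iff _ _).mpr hx
      rw [he2] at hy
      exact Bool.false_ne_true hy

theorem ports_agree (path : String) :
    is_valid_full_path path = is_valid_full_path_alt path := by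
  rw [Bool.eq_iff_iff, A_iff]
  unfold is_valid_full_path_alt
  rcases path.toList with - | ⟨c, rest⟩
  · simp
  · show _ ↔ (if c ≠ '/' then false else pvSegLoop [] rest) = true
    by_cases hc : c = '/'
    · subst hc
      simp only [ne_eq, not_true_eq_false, if_false]
      rw [segLoop_iff rest [] (by simp), List.nil_append]
      constructor
      · rintro ⟨-, hv⟩; exact hv
      · intro hv; exact ⟨List.cons_prefix_cons.mpr ⟨rfl, List.nil_prefix⟩, hv⟩
    · simp only [ne_eq, hc, not_false_eq_true, if_true]
      constructor
      · rintro ⟨hpre, -⟩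
        rcases List.cons_prefix_cons.mp hpre with ⟨he, -⟩
        exact absurd he.symm hc
      · intro hx; exact absurd hx (by simp)

-- ===== VERDICT (by name: the statement is the Claim_ definition above) =====
theorem is_valid_full_path_spec : Claim_equal_is_valid_full_path := by
  intro path _
  exact ports_agree path
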